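-- pv_equiv track=rewrite | github.com/MikaKlepper/oaks_project | pipeline/splitting.py | evaluate_partition
-- ===== SOURCE A (Python) =====
-- from collections import Counter
--
-- def evaluate_partition(A, B):
--     """
--     Evaluates the quality of a partition by computing class balance difference.
--     Lower values indicate better balance.
--
--     Parameters:
--     A, B (list of tuples): Partitioned subgroups (drug, (hyps, locs, sevs)).
--
--     Returns:
--     int: A total imbalance score.
--     """
--     count_A, count_B = Counter(), Counter()
--
--     for _, (hyps, locs, sevs) in A:
--         count_A.update([f"hyp_{h}" for h in hyps])                 # hypertrophy flags
--         count_A.update([f"loc_{l}" for l in locs if l])            # only non-None locations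
--         count_A.update([f"sev_{s}" for s in sevs if s])            # only non-None severities
--
--     for _, (hyps, locs, sevs) in B:
--         count_B.update([f"hyp_{h}" for h in hyps])
--         count_B.update([f"loc_{l}" for l in locs if l])
--         count_B.update([f"sev_{s}" for s in sevs if s])
--
--     imbalance = sum(
--         abs(count_A[label] - count_B[label])
--         for label in set(count_A.keys()).union(set(count_B.keys()))
--     )
--     return imbalance
-- ===== SOURCE B (Python) =====
-- def evaluate_partition(A, B):
--     # Greedy pairwise cancellation: build the flat label streams of both partitions,
--     # cancel each A-label against one matching B-label; the imbalance is the number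
--     # of labels left unpaired on either side. No Counter, no key-union pass.
--     def labels(part):
--         out = []
--         for _, (hyps, locs, sevs) in part:
--             out.extend(f"hyp_{h}" for h in hyps)
--             out.extend(f"loc_{l}" for l in locs if l)
--             out.extend(f"sev_{s}" for s in sevs if s)
--         return out
--
--     la = labels(A)
--     rem = labels(B)
--     unmatched = 0
--     for x in la:
--         if x in rem:
--             rem.remove(x)
--         else:
--             unmatched += 1
--     return unmatched + len(rem)
-- ===== Notes on version B (the rewrite author's own statement) =====
-- stated objective: alternative
-- what changed: B replaces A's two hash Counters and key-union reconciliation by greedy pairwise cancellation on the flat label streams: each A-label removes one equal B-label from a plain list, and the imbalance is the count of labels left unpaired on either side.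
import Mathlib
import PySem

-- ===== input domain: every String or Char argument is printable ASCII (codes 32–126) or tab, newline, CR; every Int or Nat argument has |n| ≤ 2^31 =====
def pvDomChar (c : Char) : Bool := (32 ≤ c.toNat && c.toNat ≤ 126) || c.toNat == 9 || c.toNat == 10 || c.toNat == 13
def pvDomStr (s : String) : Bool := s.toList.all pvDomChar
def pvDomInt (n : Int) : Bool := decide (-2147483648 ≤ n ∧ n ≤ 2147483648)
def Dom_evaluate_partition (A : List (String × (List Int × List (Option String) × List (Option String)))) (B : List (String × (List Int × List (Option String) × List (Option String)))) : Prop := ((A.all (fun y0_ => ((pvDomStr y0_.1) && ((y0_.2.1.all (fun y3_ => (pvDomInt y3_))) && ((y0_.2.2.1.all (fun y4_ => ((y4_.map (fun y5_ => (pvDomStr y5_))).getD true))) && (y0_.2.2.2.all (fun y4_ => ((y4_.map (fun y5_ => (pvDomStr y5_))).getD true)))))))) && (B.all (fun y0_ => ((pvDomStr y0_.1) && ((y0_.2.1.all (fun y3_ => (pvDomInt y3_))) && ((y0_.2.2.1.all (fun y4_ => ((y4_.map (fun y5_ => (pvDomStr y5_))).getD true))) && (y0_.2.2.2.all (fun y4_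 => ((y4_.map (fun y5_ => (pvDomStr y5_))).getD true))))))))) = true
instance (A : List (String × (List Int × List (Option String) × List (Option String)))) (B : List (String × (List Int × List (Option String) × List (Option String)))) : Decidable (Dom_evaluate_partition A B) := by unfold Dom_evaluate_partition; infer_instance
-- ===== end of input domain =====

-- B replaces A's two Counters and key-union pass by greedy pairwise cancellation on the
-- flat label streams (each A-label removes one equal B-label from a plain list; the
-- imbalance is the count of unpaired labels) — objective: alternative algorithm.
-- Strings are handled on the List Char side (labels f"hyp_{h}" etc. as char lists), exact on ASCII.

-- ===== PORT A =====
-- [f"hyp_{h}" for h in hyps]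
def pvHypLabels (hs : List Int) : List (List Char) :=
  hs.map (fun h => ['h','y','p','_'] ++ PySem.Int.toChars h)
-- [f"{pre}{l}" for l in ls if l]  (None and "" are falsy)
def pvOptLabels (pre : List Char) (ls : List (Option String)) : List (List Char) :=
  (ls.filter (fun l => !((l.getD "").toList == []))).map (fun l => pre ++ (l.getD "").toList)

def evaluate_partition (A : List (String × (List Int × List (Option String) × List (Option String)))) (B : List (String × (List Int × List (Option String) × List (Option String)))) : Int :=
  let count_A := A.foldl (fun d e =>
      let d := (pvHypLabels e.2.1).foldl (fun d x => d.modify x 0 (· + 1)) d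
      let d := (pvOptLabels ['l','o','c','_'] e.2.2.1).foldl (fun d x => d.modify x 0 (· + 1)) d
      (pvOptLabels ['s','e','v','_'] e.2.2.2).foldl (fun d x => d.modify x 0 (· + 1)) d)
    PySem.Dict.empty
  let count_B := B.foldl (fun d e =>
      let d := (pvHypLabels e.2.1).foldl (fun d x => d.modify x 0 (· + 1)) d
      let d := (pvOptLabels ['l','o','c','_'] e.2.2.1).foldl (fun d x => d.modify x 0 (· + 1)) d
      (pvOptLabels ['s','e','v','_'] e.2.2.2).foldl (fun d x => d.modify x 0 (· + 1)) d)
    PySem.Dict.empty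
  let labels := (PySem.Set.ofList count_A.keys).union (PySem.Set.ofList count_B.keys)
  (labels.map (fun k => |count_A.getD k 0 - count_B.getD k 0|)).sum

-- ===== PORT B =====
-- labels(part): the flat label stream built by the three extends, accumulator style
def pvLabels (part : List (String × (List Int × List (Option String) × List (Option String)))) : List (List Char) :=
  part.foldl (fun out e =>
      out ++ pvHypLabels e.2.1 ++ pvOptLabels ['l','o','c','_'] e.2.2.1 ++ pvOptLabels ['s','e','v','_'] e.2.2.2) []

-- the cancellation loop: 'if x in rem: rem.remove(x) else: unmatched += 1'
-- (Python list.remove deletes the first equal element = List.erase)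
def pvCancel : List (List Char) → List (List Char) → Int → Int
  | [], rem, u => u + rem.length
  | x :: t, rem, u => if rem.contains x then pvCancel t (rem.erase x) u else pvCancel t rem (u + 1)

def evaluate_partition_alt (A : List (String × (List Int × List (Option String) × List (Option String)))) (B : List (String × (List Int × List (Option String) × List (Option String)))) : Int :=
  pvCancel (pvLabels A) (pvLabels B) 0

-- ===== PRECONDITION & SPEC =====
def Spec_evaluate_partition (A : List (String × (List Int × List (Option String) × List (Option String)))) (B : List (String × (List Int × List (Option String) × List (Option String)))) (out : Int) : Prop := out = evaluate_partition_alt A B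
instance (A : List (String × (List Int × List (Option String) × List (Option String)))) (B : List (String × (List Int × List (Option String) × List (Option String)))) (out : Int) : Decidable (Spec_evaluate_partition A B out) := by unfold Spec_evaluate_partition; infer_instance

-- ===== CLAIM (what is proved, stated in full; the proofs are below) =====
def Claim_equal_evaluate_partition : Prop := ∀ (A : List (String × (List Int × List (Option String) × List (Option String)))) (B : List (String × (List Int × List (Option String) × List (Option String)))), Dom_evaluate_partition A B → Spec_evaluate_partition A B (evaluate_partition A B)

-- ===== LEMMAS AND PROOFS =====

-- all labels contributed by one entry, in the order both programs visit them
def pvEntryLabels (e : String × (List Int × List (Option String) × List (Option String))) : List (List Char) :=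
  pvHypLabels e.2.1 ++ pvOptLabels ['l','o','c','_'] e.2.2.1 ++ pvOptLabels ['s','e','v','_'] e.2.2.2

-- A's outer loops are a single fold over the flattened label stream
theorem foldl_entries (g : PySem.Dict (List Char) Int → List Char → PySem.Dict (List Char) Int)
    (L : List (String × (List Int × List (Option String) × List (Option String))))
    (d : PySem.Dict (List Char) Int) :
    L.foldl (fun d e =>
      let d := (pvHypLabels e.2.1).foldl g d
      let d := (pvOptLabels ['l','o','c','_'] e.2.2.1).foldl g d
      (pvOptLabels ['s','e','v','_'] e.2.2.2).foldl g d) d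
    = (L.flatMap pvEntryLabels).foldl g d := by
  induction L generalizing d with
  | nil => rfl
  | cons e t ih => simp [pvEntryLabels, List.foldl_append, ih]

-- B's label builder is the same flattened stream
theorem pvLabels_eq (L : List (String × (List Int × List (Option String) × List (Option String))))
    (acc : List (List Char)) :
    L.foldl (fun out e =>
      out ++ pvHypLabels e.2.1 ++ pvOptLabels ['l','o','c','_'] e.2.2.1 ++ pvOptLabels ['s','e','v','_'] e.2.2.2) acc
    = acc ++ L.flatMap pvEntryLabels := by
  induction L generalizing acc with
  | nil => simp
  | cons e t ih =>
    rw [List.foldl_cons, ih, List.flatMap_cons, pvEntryLabels]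
    simp [List.append_assoc]

-- sum of counts over any finset containing all elements = length
theorem sum_count_eq_length (l : List (List Char)) : ∀ (S : Finset (List Char)),
    (∀ k, k ∈ l → k ∈ S) → (∑ k ∈ S, (l.count k : Int)) = l.length := by
  induction l with
  | nil => intro S _; simp
  | cons x t ih =>
    intro S h
    have hs : (∑ k ∈ S, ((x :: t).count k : Int))
        = (∑ k ∈ S, (t.count k : Int)) + ∑ k ∈ S, (if x = k then (1 : Int) else 0) := by
      rw [← Finset.sum_add_distrib]
      refine Finset.sum_congr rfl (fun k _ => ?_)
      by_cases hk : x = k <;> simp [hk]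
    rw [hs, ih S (fun k hk => h k (List.mem_cons_of_mem _ hk)),
      Finset.sum_ite_eq S x (fun _ => (1 : Int)), if_pos (h x List.mem_cons_self)]
    push_cast [List.length_cons]; ring

-- the cancellation loop computes the L1 distance of the two count functions
theorem pvCancel_eq (la : List (List Char)) : ∀ (rem : List (List Char)) (u : Int)
    (S : Finset (List Char)), (∀ k, k ∈ la → k ∈ S) → (∀ k, k ∈ rem → k ∈ S) →
    pvCancel la rem u = u + ∑ k ∈ S, |(la.count k : Int) - rem.count k| := by
  induction la with
  | nil =>
    intro rem u S _ hrem
    have h : (∑ k ∈ S, |(([] : List (List Char)).count k : Int) - rem.count k|)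
        = ∑ k ∈ S, (rem.count k : Int) :=
      Finset.sum_congr rfl (fun k _ => by simp)
    rw [pvCancel, h, sum_count_eq_length rem S hrem]
  | cons x t ih =>
    intro rem u S hla hrem
    by_cases hx : x ∈ rem
    · rw [pvCancel, if_pos (by simpa using hx)]
      rw [ih (rem.erase x) u S (fun k hk => hla k (List.mem_cons_of_mem _ hk))
          (fun k hk => hrem k (List.mem_of_mem_erase hk))]
      congr 1
      refine Finset.sum_congr rfl (fun k _ => ?_)
      by_cases hkx : k = x
      · subst hkx
        have h1 : 1 ≤ rem.count k := List.count_pos_iff.mpr hx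
        rw [List.count_erase_self, List.count_cons_self]
        congr 1
        rw [Nat.cast_sub h1]
        push_cast; ring
      · have hxk : x ≠ k := fun h => hkx h.symm
        rw [List.count_erase, List.count_cons]
        simp [hxk]
    · rw [pvCancel, if_neg (by simpa using hx)]
      rw [ih rem (u + 1) S (fun k hk => hla k (List.mem_cons_of_mem _ hk)) hrem]
      have hsplit : (∑ k ∈ S, |((x :: t).count k : Int) - rem.count k|)
          = ∑ k ∈ S, (|(t.count k : Int) - rem.count k| + if k = x then 1 else 0) := by
        refine Finset.sum_congr rfl (fun k _ => ?_)
        by_cases hkx : k = x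
        · subst hkx
          rw [List.count_cons_self, List.count_eq_zero.mpr hx]
          push_cast
          rw [sub_zero, sub_zero, abs_of_nonneg (by positivity), abs_of_nonneg (by positivity)]
          simp
        · have hxk : x ≠ k := fun h => hkx h.symm
          rw [List.count_cons]
          simp [hxk, hkx]
      rw [hsplit, Finset.sum_add_distrib, Finset.sum_ite_eq' S x (fun _ => (1 : Int)),
        if_pos (hla x List.mem_cons_self)]
      ring

-- A's expression on the two flattened label streams, as the same L1 distance
theorem portA_eq (L1 L2 : List (List Char)) :
    ((((PySem.Set.ofList (L1.foldl (fun d x => d.modify x 0 (· + 1)) (PySem.Dict.empty : PySem.Dict (List Char) Int)).keys).union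
        (PySem.Set.ofList (L2.foldl (fun d x => d.modify x 0 (· + 1)) (PySem.Dict.empty : PySem.Dict (List Char) Int)).keys)) : List (List Char)).map
      (fun k => |(L1.foldl (fun d x => d.modify x 0 (· + 1)) (PySem.Dict.empty : PySem.Dict (List Char) Int)).getD k 0
               - (L2.foldl (fun d x => d.modify x 0 (· + 1)) (PySem.Dict.empty : PySem.Dict (List Char) Int)).getD k 0|)).sum
    = ∑ k ∈ (L1 ++ L2).toFinset, |(L1.count k : Int) - L2.count k| := by
  set cA := L1.foldl (fun d x => d.modify x 0 (· + 1)) (PySem.Dict.empty : PySem.Dict (List Char) Int) with hcA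
  set cB := L2.foldl (fun d x => d.modify x 0 (· + 1)) (PySem.Dict.empty : PySem.Dict (List Char) Int) with hcB
  have hgA : ∀ k, cA.getD k 0 = (L1.count k : Int) := by
    intro k; rw [hcA, PySem.Dict.getD_foldl_modify_add_one]; simp
  have hgB : ∀ k, cB.getD k 0 = (L2.count k : Int) := by
    intro k; rw [hcB, PySem.Dict.getD_foldl_modify_add_one]; simp
  have hkA : cA.keys = PySem.Set.update ([] : PySem.Set (List Char)) L1 := by
    rw [hcA, PySem.Dict.keys_foldl_modify]; rfl
  have hkB : cB.keys = PySem.Set.update ([] : PySem.Set (List Char)) L2 := by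
    rw [hcB, PySem.Dict.keys_foldl_modify]; rfl
  set U := (((PySem.Set.ofList cA.keys).union (PySem.Set.ofList cB.keys)) : List (List Char)) with hU
  have hndU : U.Nodup := PySem.Set.nodup_union _ _ (PySem.Set.nodup_ofList _)
  have hmem : ∀ k, k ∈ U ↔ k ∈ L1 ∨ k ∈ L2 := by
    intro k
    rw [hU, PySem.Set.mem_union, PySem.Set.mem_ofList, PySem.Set.mem_ofList, hkA, hkB,
      PySem.Set.mem_update, PySem.Set.mem_update]
    simp
  have h1 : U.map (fun k => |cA.getD k 0 - cB.getD k 0|)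
      = U.map (fun k => |(L1.count k : Int) - L2.count k|) := by
    apply List.map_congr_left; intro k _; rw [hgA, hgB]
  rw [h1]
  have hfs : U.toFinset = (L1 ++ L2).toFinset := by
    apply Finset.ext; intro k
    simp [List.mem_toFinset, hmem k]
  rw [← hfs, ← List.sum_toFinset _ hndU]

-- ===== VERDICT (by name: the statement is the Claim_ definition above) =====
theorem evaluate_partition_spec : Claim_equal_evaluate_partition := by
  intro A B _
  unfold Spec_evaluate_partition evaluate_partition evaluate_partition_alt pvLabels
  simp only [foldl_entries, pvLabels_eq, List.nil_append]
  rw [portA_eq]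
  rw [pvCancel_eq (A.flatMap pvEntryLabels) (B.flatMap pvEntryLabels) 0 ((A.flatMap pvEntryLabels ++ B.flatMap pvEntryLabels).toFinset)
      (fun k hk => List.mem_toFinset.mpr (List.mem_append.mpr (Or.inl hk)))
      (fun k hk => List.mem_toFinset.mpr (List.mem_append.mpr (Or.inr hk)))]
  ring
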